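-- pv_equiv track=rewrite | github.com/jamesborg46/legallm | model/training/text_dataset.py | _label_tokens
-- ===== SOURCE A (Python) =====
-- def _label_tokens(offsets, ends):
--     ends_idx = 0
--     labels = []
--     encoded_end_idxes = []
--
--     for offsets_idx, offset in enumerate(offsets):
--         left, right = offset
--         if (ends_idx < len(ends)) and (left <= (ends[ends_idx] - 1) < right):
--             labels.append(True)
--             encoded_end_idxes.append(offsets_idx)
--             ends_idx += 1
--         else:
--             labels.append(False)
--
--     return encoded_end_idxes, labels
-- ===== SOURCE B (Python) =====
-- def _label_tokens(offsets, ends):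
--     labels = [False] * len(offsets)
--     encoded_end_idxes = []
--     offsets_idx = 0
--     n = len(offsets)
--     for end in ends:
--         target = end - 1
--         while offsets_idx < n:
--             left, right = offsets[offsets_idx]
--             offsets_idx += 1
--             if left <= target < right:
--                 labels[offsets_idx - 1] = True
--                 encoded_end_idxes.append(offsets_idx - 1)
--                 break
--         else:
--             break
--     return encoded_end_idxes, labels
-- ===== Notes on version B (the rewrite author's own statement) =====
-- stated objective: alternative
-- what changed: Inverted the driving loop: B iterates over ends and advances a single monotone pointer into offsets (preallocating labels as all-False and setting hits), instead of A's loop over offsets with an ends cursor checked at every offset.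
import Mathlib
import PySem

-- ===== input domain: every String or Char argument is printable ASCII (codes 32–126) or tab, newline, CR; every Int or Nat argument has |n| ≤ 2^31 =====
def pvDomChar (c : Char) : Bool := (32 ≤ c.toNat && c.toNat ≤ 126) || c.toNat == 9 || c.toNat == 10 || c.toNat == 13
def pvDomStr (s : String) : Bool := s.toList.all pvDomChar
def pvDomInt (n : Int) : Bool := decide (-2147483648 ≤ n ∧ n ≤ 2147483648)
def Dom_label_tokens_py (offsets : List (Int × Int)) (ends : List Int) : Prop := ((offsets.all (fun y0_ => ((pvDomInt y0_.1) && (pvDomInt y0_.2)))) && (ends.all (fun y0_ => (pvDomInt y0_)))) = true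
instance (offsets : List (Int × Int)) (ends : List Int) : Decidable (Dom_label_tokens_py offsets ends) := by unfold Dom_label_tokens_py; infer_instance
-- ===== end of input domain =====

-- B inverts the driving loop (outer loop over `ends`, one monotone pointer into `offsets`,
-- labels preallocated False); same cost, alternative decomposition. Proven equal to A everywhere.

-- ===== PORT A =====
-- A's for-loop over enumerate(offsets): structural recursion over offsets carrying the
-- current index `i` and the not-yet-consumed suffix of `ends` (= A's ends_idx cursor).
def pvGoA : List (Int × Int) → Int → List Int → List Int × List Bool
  | [], _, _ => ([], [])
  | (l, r) :: os, i, es =>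
    match es with
    | e :: es' =>
      if l ≤ e - 1 ∧ e - 1 < r then
        let p := pvGoA os (i + 1) es'
        (i :: p.1, true :: p.2)
      else
        let p := pvGoA os (i + 1) (e :: es')
        (p.1, false :: p.2)
    | [] =>
      let p := pvGoA os (i + 1) []
      (p.1, false :: p.2)

def label_tokens_py (offsets : List (Int × Int)) (ends : List Int) : List Int × List Bool :=
  pvGoA offsets 0 ends

-- ===== PORT B =====
-- B's inner `while`: advance the offsets pointer until a span contains t, else none.
def pvScan (offsets : List (Int × Int)) (t : Int) (j : Nat) : Option Nat :=
  if h : j < offsets.length then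
    if offsets[j].1 ≤ t ∧ t < offsets[j].2 then some j else pvScan offsets t (j + 1)
  else none
termination_by offsets.length - j

-- B's outer for-loop over `ends`, mutating the preallocated labels list via List.set.
def pvGoB (offsets : List (Int × Int)) : List Int → Nat → List Bool → List Int × List Bool
  | [], _, labels => ([], labels)
  | e :: es, j, labels =>
    match pvScan offsets (e - 1) j with
    | none => ([], labels)
    | some j' =>
      let p := pvGoB offsets es (j' + 1) (labels.set j' true)
      ((j' : Int) :: p.1, p.2)

def label_tokens_py_alt (offsets : List (Int × Int)) (ends : List Int) : List Int × List Bool :=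
  pvGoB offsets ends 0 (List.replicate offsets.length false)

-- ===== PRECONDITION & SPEC =====
def Spec_label_tokens_py (offsets : List (Int × Int)) (ends : List Int) (out : List Int × List Bool) : Prop := out = label_tokens_py_alt offsets ends
instance (offsets : List (Int × Int)) (ends : List Int) (out : List Int × List Bool) : Decidable (Spec_label_tokens_py offsets ends out) := by unfold Spec_label_tokens_py; infer_instance

-- ===== CLAIM (what is proved, stated in full; the proofs are below) =====
def Claim_equal_label_tokens_py : Prop := ∀ (offsets : List (Int × Int)) (ends : List Int), Dom_label_tokens_py offsets ends → Spec_label_tokens_py offsets ends (label_tokens_py offsets ends)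

-- ===== LEMMAS AND PROOFS =====

theorem pvGoA_nil (os : List (Int × Int)) : ∀ i : Int,
    pvGoA os i [] = ([], List.replicate os.length false) := by
  induction os with
  | nil => intro i; rfl
  | cons o os ih =>
    intro i
    obtain ⟨l, r⟩ := o
    simp [pvGoA, ih (i + 1), List.replicate_succ]

-- one step of B's outer loop (the inner while), by fuel on how far the pointer is from the end
theorem pvStepB (offsets : List (Int × Int)) (e : Int) (es' : List Int)
    (IH : ∀ (j : Nat) (labels : List Bool), labels.length = offsets.length →
      labels.drop j = List.replicate (offsets.length - j) false →
      pvGoB offsets es' j labels =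
        ((pvGoA (offsets.drop j) (j : Int) es').1,
          labels.take j ++ (pvGoA (offsets.drop j) (j : Int) es').2)) :
    ∀ (n j : Nat) (labels : List Bool), offsets.length - j ≤ n →
      labels.length = offsets.length →
      labels.drop j = List.replicate (offsets.length - j) false →
      pvGoB offsets (e :: es') j labels =
        ((pvGoA (offsets.drop j) (j : Int) (e :: es')).1,
          labels.take j ++ (pvGoA (offsets.drop j) (j : Int) (e :: es')).2) := by
  intro n
  induction n with
  | zero =>
    intro j labels hn hlen _
    have hj : offsets.length ≤ j := by omega
    have hdrop : offsets.drop j = [] := List.drop_eq_nil_of_le hj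
    have hscan : pvScan offsets (e - 1) j = none := by
      rw [pvScan, dif_neg (by omega)]
    simp [pvGoB, hscan, hdrop, pvGoA, List.take_of_length_le (by omega : labels.length ≤ j)]
  | succ n ihn =>
    intro j labels hn hlen hdrop
    cases hget : offsets[j]? with
    | none =>
      have hj : offsets.length ≤ j := by
        by_contra hc
        rw [List.getElem?_eq_none_iff] at hget; omega
      have hdropnil : offsets.drop j = [] := List.drop_eq_nil_of_le hj
      have hscan : pvScan offsets (e - 1) j = none := by
        rw [pvScan, dif_neg (by omega)]
      simp [pvGoB, hscan, hdropnil, pvGoA, List.take_of_length_le (by omega : labels.length ≤ j)]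
    | some o =>
      obtain ⟨l, r⟩ := o
      have hj : j < offsets.length := List.getElem?_eq_some_iff.mp hget |>.1
      have hgetE : offsets[j] = (l, r) := by
        have := List.getElem?_eq_some_iff.mp hget
        exact this.2
      have hcons : offsets.drop j = (l, r) :: offsets.drop (j + 1) := by
        rw [List.drop_eq_getElem_cons hj, hgetE]
      have hlabj : labels[j]? = some false := by
        have h0 : (labels.drop j)[0]? = labels[j]? := by
          simp [List.getElem?_drop]
        rw [hdrop] at h0
        rw [← h0, List.getElem?_replicate, if_pos (by omega : 0 < offsets.length - j)]
      have hdrop1 : labels.drop (j + 1) = List.replicate (offsets.length - (j + 1)) false := by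
        have : labels.drop (j + 1) = (labels.drop j).drop 1 := by
          rw [List.drop_drop]
        rw [this, hdrop, List.drop_replicate]
        congr 1
      by_cases hm : l ≤ e - 1 ∧ e - 1 < r
      · -- hit at j
        have hscan : pvScan offsets (e - 1) j = some j := by
          rw [pvScan, dif_pos hj, hgetE, if_pos hm]
        have hset_len : (labels.set j true).length = offsets.length := by
          simp [hlen]
        have hset_drop : (labels.set j true).drop (j + 1) =
            List.replicate (offsets.length - (j + 1)) false := by
          rw [List.drop_set]
          simp [hdrop1]
        have hIH := IH (j + 1) (labels.set j true) hset_len hset_drop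
        have htake : (labels.set j true).take (j + 1) = labels.take j ++ [true] := by
          rw [List.take_add_one, List.take_set,
            List.set_eq_of_length_le (by simp [List.length_take])]
          simp [hlen, hj]
        have hcast : ((j + 1 : Nat) : Int) = (j : Int) + 1 := by push_cast; ring
        simp only [pvGoB, hscan, hIH, hcons, pvGoA, if_pos hm, htake, hcast]
        simp
      · -- miss at j: pointer advances
        have hscan : pvScan offsets (e - 1) j = pvScan offsets (e - 1) (j + 1) := by
          rw [pvScan, dif_pos hj, hgetE, if_neg hm]
        have hIH := ihn (j + 1) labels (by omega) hlen hdrop1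
        have htake : labels.take (j + 1) = labels.take j ++ [false] := by
          rw [List.take_add_one, hlabj]; rfl
        have hcast : ((j + 1 : Nat) : Int) = (j : Int) + 1 := by push_cast; ring
        have hB : pvGoB offsets (e :: es') j labels = pvGoB offsets (e :: es') (j + 1) labels := by
          simp only [pvGoB, hscan]
        rw [hB, hIH, hcons]
        simp only [pvGoA, if_neg hm, hcast, htake]
        simp

theorem pvMain (offsets : List (Int × Int)) : ∀ (es : List Int) (j : Nat) (labels : List Bool),
    labels.length = offsets.length →
    labels.drop j = List.replicate (offsets.length - j) false →
    pvGoB offsets es j labels =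
      ((pvGoA (offsets.drop j) (j : Int) es).1,
        labels.take j ++ (pvGoA (offsets.drop j) (j : Int) es).2) := by
  intro es
  induction es with
  | nil =>
    intro j labels hlen hdrop
    rw [pvGoA_nil]
    simp only [pvGoB, List.length_drop]
    rw [← hdrop, List.take_append_drop]
  | cons e es' ih =>
    intro j labels hlen hdrop
    exact pvStepB offsets e es' ih (offsets.length - j) j labels (le_refl _) hlen hdrop

-- ===== VERDICT (by name: the statement is the Claim_ definition above) =====
theorem label_tokens_py_spec : Claim_equal_label_tokens_py := by
  intro offsets ends _
  unfold Spec_label_tokens_py label_tokens_py label_tokens_py_alt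
  have h := pvMain offsets ends 0 (List.replicate offsets.length false)
    (by simp) (by simp)
  simp only [List.drop_zero, List.take_zero, List.nil_append, Nat.cast_zero] at h
  rw [h]
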